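-- pv_equiv track=rewrite | github.com/cjfgml123/python_codingTest | programmers_level1/콜라문제.py | Mysolution1
-- ===== SOURCE A (Python) =====
-- def Mysolution1(a, b, n):
--     answer = 0
--
--     while n >= a:
--         cnt = (n // a) * b
--         answer += cnt
--         cnt += n % a
--         n = cnt
--     return answer
-- ===== SOURCE B (Python) =====
-- def Mysolution1(a, b, n):
--     # Closed form instead of the simulation loop: each net spend of a-b
--     # bottles yields b new ones, so the total handed out is (n-b)//(a-b)*b.
--     if n < a:
--         return 0
--     return (n - b) // (a - b) * b
-- ===== Notes on version B (the rewrite author's own statement) =====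
-- stated objective: simpler
-- what changed: Replaces the exchange-simulation while-loop with the O(1) closed form (n-b)//(a-b)*b guarded by n < a.
-- outside the precondition, e.g. on Mysolution1(1, -10, 2): A returns -20, B returns -10
import Mathlib
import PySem

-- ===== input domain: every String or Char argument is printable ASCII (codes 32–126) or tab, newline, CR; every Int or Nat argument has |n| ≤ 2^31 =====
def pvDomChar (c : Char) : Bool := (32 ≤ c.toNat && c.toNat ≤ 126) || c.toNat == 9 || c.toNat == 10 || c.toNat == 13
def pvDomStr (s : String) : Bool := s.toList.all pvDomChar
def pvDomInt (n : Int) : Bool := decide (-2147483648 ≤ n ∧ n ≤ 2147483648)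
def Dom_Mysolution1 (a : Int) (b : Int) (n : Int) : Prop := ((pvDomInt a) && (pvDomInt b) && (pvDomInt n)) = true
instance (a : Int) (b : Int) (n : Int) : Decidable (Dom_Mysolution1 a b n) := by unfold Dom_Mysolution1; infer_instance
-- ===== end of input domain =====

-- B replaces A's exchange-simulation loop with the closed form (n-b)//(a-b)*b (guarded by n < a): simpler, O(1).


-- ===== PORT A =====
-- The while-loop of A, with fuel; on Pre_ (1 ≤ a, 0 ≤ b < a, or n < a) each
-- iteration strictly decreases a nonnegative n, so fuel n.toNat + 1 suffices.
def pyLoopA (a b : Int) : Nat → Int → Int → Int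
  | 0, answer, _ => answer
  | f + 1, answer, n =>
    if a ≤ n then
      let cnt := PySem.Int.floordiv n a * b
      pyLoopA a b f (answer + cnt) (cnt + PySem.Int.mod n a)
    else answer

def Mysolution1 (a : Int) (b : Int) (n : Int) : Int :=
  pyLoopA a b (n.toNat + 1) 0 n

-- ===== PORT B =====
def Mysolution1_alt (a : Int) (b : Int) (n : Int) : Int :=
  if n < a then 0 else PySem.Int.floordiv (n - b) (a - b) * b

-- ===== PRECONDITION & SPEC =====
-- Pre_ restricts to the problem's natural domain 0 ≤ b < a (b empty bottles
-- traded for fewer than a full ones), plus the trivial no-exchange inputs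
-- n < a; outside it A diverges (a ≤ b and a ≤ n), raises ZeroDivisionError
-- (a = 0 ≤ n), or (negative b) returns accidental negative totals.
def Pre_Mysolution1 (a : Int) (b : Int) (n : Int) : Prop :=
  (1 ≤ a ∧ 0 ≤ b ∧ b < a) ∨ n < a
instance (a : Int) (b : Int) (n : Int) : Decidable (Pre_Mysolution1 a b n) := by
  unfold Pre_Mysolution1; infer_instance

def pvWitness_Mysolution1 : Int × Int × Int := (2, 1, 20)

def Spec_Mysolution1 (a : Int) (b : Int) (n : Int) (out : Int) : Prop := out = Mysolution1_alt a b n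
instance (a : Int) (b : Int) (n : Int) (out : Int) : Decidable (Spec_Mysolution1 a b n out) := by unfold Spec_Mysolution1; infer_instance

-- ===== CLAIM (what is proved, stated in full; the proofs are below) =====
def Claim_equal_Mysolution1 : Prop := ∀ (a : Int) (b : Int) (n : Int), Dom_Mysolution1 a b n → Pre_Mysolution1 a b n → Spec_Mysolution1 a b n (Mysolution1 a b n)

-- ===== LEMMAS AND PROOFS =====

-- Loop invariant: with 1 ≤ a and 0 ≤ b < a and enough fuel, the loop adds
-- exactly the closed form to the accumulator.
lemma pyLoopA_closed (a b : Int) (ha : 1 ≤ a) (hb : 0 ≤ b) (hba : b < a) :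
    ∀ (f : Nat) (n acc : Int), n.toNat < f →
      pyLoopA a b f acc n =
        acc + (if n < a then 0 else PySem.Int.floordiv (n - b) (a - b) * b) := by
  intro f
  induction f with
  | zero => intro n acc h; omega
  | succ f ih =>
    intro n acc hfuel
    by_cases hn : a ≤ n
    · have hq1 : 1 ≤ PySem.Int.floordiv n a := by
        rw [PySem.Int.le_floordiv_iff_mul_le (by omega)]; omega
      have hr0 : 0 ≤ PySem.Int.mod n a := PySem.Int.mod_nonneg n (by omega)
      have hrlt : PySem.Int.mod n a < a := PySem.Int.mod_lt n (by omega)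
      have hsum : PySem.Int.floordiv n a * a + PySem.Int.mod n a = n :=
        PySem.Int.floordiv_mul_add_mod n a
      set q := PySem.Int.floordiv n a with hqdef
      set r := PySem.Int.mod n a with hrdef
      have hn'0 : 0 ≤ q * b + r := by nlinarith
      have hn'lt : q * b + r < n := by nlinarith
      have hrec := ih (q * b + r) (acc + q * b) (by omega)
      rw [pyLoopA, if_pos hn, hrec]
      have hshift : PySem.Int.floordiv (n - b) (a - b)
          = PySem.Int.floordiv (q * b + r - b) (a - b) + q := by
        rw [PySem.Int.floordiv_eq_ediv_of_pos (by omega),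
            PySem.Int.floordiv_eq_ediv_of_pos (by omega)]
        have : n - b = (q * b + r - b) + q * (a - b) := by ring_nf; omega
        rw [this, Int.add_mul_ediv_right _ _ (by omega : a - b ≠ 0)]
      by_cases hn' : q * b + r < a
      · have hz : PySem.Int.floordiv (q * b + r - b) (a - b) = 0 := by
          rw [PySem.Int.floordiv_eq_ediv_of_pos (by omega)]
          exact Int.ediv_eq_zero_of_lt (by nlinarith) (by omega)
        rw [if_pos hn', if_neg (by omega), hshift, hz]
        ring
      · rw [if_neg hn', if_neg (by omega), hshift]
        ring
    · rw [pyLoopA, if_neg hn, if_pos (by omega)]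
      ring

-- ===== VERDICT (by name: the statement is the Claim_ definition above) =====
theorem Mysolution1_spec : Claim_equal_Mysolution1 := by
  intro a b n _ hpre
  unfold Spec_Mysolution1 Mysolution1 Mysolution1_alt
  rcases hpre with ⟨ha, hb, hba⟩ | hn
  · rw [pyLoopA_closed a b ha hb hba (n.toNat + 1) n 0 (by omega)]
    ring
  · rw [pyLoopA, if_neg (by omega), if_pos hn]
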